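-- pv_equiv track=rewrite | github.com/ben-hutchinson/pokeleximon | services/crossword-gen/scripts/generate_quick_templates.py | line_has_short_run
-- ===== SOURCE A (Python) =====
-- def line_has_short_run(line: list[bool], min_len: int) -> bool:
--     run = 0
--     for blocked in line:
--         if blocked:
--             if 0 < run < min_len:
--                 return True
--             run = 0
--         else:
--             run += 1
--     if 0 < run < min_len:
--         return True
--     return False
-- ===== SOURCE B (Python) =====
-- def line_has_short_run(line: list[bool], min_len: int) -> bool:
--     # Segment the line into maximal runs of equal cells, then check the
--     # unblocked (False) runs for one shorter than min_len.
--     runs = []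
--     if line:
--         val, cnt = line[0], 1
--         for b in line[1:]:
--             if b == val:
--                 cnt += 1
--             else:
--                 runs.append((val, cnt))
--                 val, cnt = b, 1
--         runs.append((val, cnt))
--     return any(cnt < min_len for val, cnt in runs if not val)
-- ===== Notes on version B (the rewrite author's own statement) =====
-- stated objective: alternative
-- what changed: B first segments the line into maximal (value,length) runs and then scans the run list for a short False run, instead of A's single cell-by-cell scan with a reset-on-block counter and early returns.
import Mathlib
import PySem

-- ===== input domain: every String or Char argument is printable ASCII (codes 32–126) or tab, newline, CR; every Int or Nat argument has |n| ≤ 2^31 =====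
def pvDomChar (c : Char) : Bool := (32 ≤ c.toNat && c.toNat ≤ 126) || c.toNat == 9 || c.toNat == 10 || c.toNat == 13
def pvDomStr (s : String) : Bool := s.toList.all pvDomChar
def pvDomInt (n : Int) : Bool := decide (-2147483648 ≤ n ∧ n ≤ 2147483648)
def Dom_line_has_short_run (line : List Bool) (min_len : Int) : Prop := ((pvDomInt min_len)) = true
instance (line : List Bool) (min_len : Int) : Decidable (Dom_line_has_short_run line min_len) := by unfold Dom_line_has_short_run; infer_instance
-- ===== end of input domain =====

-- ===== PORT A =====
-- A: single scan keeping a counter of the current unblocked run, reset (after a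
-- shortness check) on each blocked cell, with a final check at the end.
def lhsrLoopA (line : List Bool) (run : Int) (min_len : Int) : Bool :=
  match line with
  | [] => decide (0 < run ∧ run < min_len)
  | blocked :: rest =>
    if blocked then
      if 0 < run ∧ run < min_len then true
      else lhsrLoopA rest 0 min_len
    else lhsrLoopA rest (run + 1) min_len

def line_has_short_run (line : List Bool) (min_len : Int) : Bool :=
  lhsrLoopA line 0 min_len

-- ===== PORT B =====
-- B: build the list of maximal (value, count) runs, then check the False runs.
def lhsrGroupsGo (val : Bool) (cnt : Nat) : List Bool → List (Bool × Nat)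
  | [] => [(val, cnt)]
  | b :: rest => if b = val then lhsrGroupsGo val (cnt + 1) rest
                 else (val, cnt) :: lhsrGroupsGo b 1 rest

def lhsrRuns (line : List Bool) : List (Bool × Nat) :=
  match line with
  | [] => []
  | b :: rest => lhsrGroupsGo b 1 rest

def line_has_short_run_alt (line : List Bool) (min_len : Int) : Bool :=
  (lhsrRuns line).any (fun p => !p.1 && decide ((p.2 : Int) < min_len))

-- ===== PRECONDITION & SPEC =====
def Spec_line_has_short_run (line : List Bool) (min_len : Int) (out : Bool) : Prop := out = line_has_short_run_alt line min_len
instance (line : List Bool) (min_len : Int) (out : Bool) : Decidable (Spec_line_has_short_run line min_len out) := by unfold Spec_line_has_short_run; infer_instance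

-- ===== CLAIM (what is proved, stated in full; the proofs are below) =====
def Claim_equal_line_has_short_run : Prop := ∀ (line : List Bool) (min_len : Int), Dom_line_has_short_run line min_len → Spec_line_has_short_run line min_len (line_has_short_run line min_len)

-- ===== LEMMAS AND PROOFS =====
-- Invariant: while a maximal run of value `val` and length `cnt ≥ 1` is open,
-- A's counter is `cnt` if the run is unblocked and `0` if it is blocked.
theorem lhsr_loop_eq_groups (min_len : Int) :
    ∀ (rest : List Bool) (val : Bool) (cnt : Nat), 1 ≤ cnt →
      lhsrLoopA rest (if val then 0 else (cnt : Int)) min_len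
        = (lhsrGroupsGo val cnt rest).any (fun p => !p.1 && decide ((p.2 : Int) < min_len)) := by
  intro rest
  induction rest with
  | nil =>
    intro val cnt hcnt
    cases val <;> simp [lhsrLoopA, lhsrGroupsGo] <;> omega
  | cons b rest ih =>
    intro val cnt hcnt
    cases val <;> cases b <;>
      simp only [lhsrLoopA, lhsrGroupsGo, if_true, if_false, reduceIte, Bool.false_eq_true]
    · -- val = false, b = false : run continues
      have h := ih false (cnt + 1) (by omega)
      simp only [if_false, Bool.false_eq_true, reduceIte] at h ⊢
      rw [show ((cnt : Int) + 1) = ((cnt + 1 : Nat) : Int) by push_cast; ring]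
      exact h
    · -- val = false, b = true : blocked cell closes a False run of length cnt
      have h := ih true 1 (by omega)
      simp only [if_true, reduceIte] at h
      by_cases hs : (0 : Int) < (cnt : Int) ∧ (cnt : Int) < min_len
      · simp [hs, List.any_cons, show ((cnt : Int) < min_len) by omega]
        omega
      · have hns : ¬ ((cnt : Int) < min_len) := by omega
        simp [hs, h, List.any_cons, hns]
    · -- val = true, b = false : new False run of length 1
      have h := ih false 1 (by omega)
      simp only [if_false, Bool.false_eq_true, reduceIte, Nat.cast_one] at h
      simp [List.any_cons, h]
    · -- val = true, b = true : blocked run continues, counter is 0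
      have h := ih true (cnt + 1) (by omega)
      simp only [if_true, reduceIte] at h
      simp [show ¬ ((0:Int) < 0 ∧ (0:Int) < min_len) by omega, h]

-- ===== VERDICT (by name: the statement is the Claim_ definition above) =====
theorem line_has_short_run_spec : Claim_equal_line_has_short_run := by
  intro line min_len _
  unfold Spec_line_has_short_run line_has_short_run line_has_short_run_alt lhsrRuns
  cases line with
  | nil => simp [lhsrLoopA]
  | cons b rest =>
    cases b
    · have h := lhsr_loop_eq_groups min_len rest false 1 (by omega)
      simp only [if_false, Bool.false_eq_true, reduceIte] at h
      simpa [lhsrLoopA] using h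
    · have h := lhsr_loop_eq_groups min_len rest true 1 (by omega)
      simp only [if_true, reduceIte] at h
      simpa [lhsrLoopA, show ¬ ((0:Int) < 0 ∧ (0:Int) < min_len) by omega] using h
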